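-- pv_equiv track=rewrite | github.com/CobraTechLLC/Cobra_Tail | client.py | _pick_best_candidate_endpoint
-- ===== SOURCE A (Python) =====
-- def _pick_best_candidate_endpoint(candidates: list[dict]) -> str | None:
--     """Pick the best endpoint from a candidate list.
--     Priority: IPv6 > UPnP > STUN > public > LAN > VPN-routed.
--     """
--     priority_order = ["ipv6", "upnp", "stun", "public", "lan", "vpn_routed"]
--     for ptype in priority_order:
--         for c in candidates:
--             if c.get("type") == ptype and c.get("endpoint"):
--                 return c["endpoint"]
--     # Fallback: return first candidate with an endpoint
--     for c in candidates:
--         if c.get("endpoint"):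
--             return c["endpoint"]
--     return None
-- ===== SOURCE B (Python) =====
-- def _pick_best_candidate_endpoint(candidates: list[dict]) -> str | None:
--     """One pass: index the first truthy endpoint per type, remember the first
--     truthy endpoint overall as fallback; then walk the priority order once."""
--     priority_order = ["ipv6", "upnp", "stun", "public", "lan", "vpn_routed"]
--     by_type = {}
--     fallback = None
--     for c in candidates:
--         ep = c.get("endpoint")
--         if not ep:
--             continue
--         if fallback is None:
--             fallback = ep
--         t = c.get("type")
--         if t is not None and t not in by_type:
--             by_type[t] = ep
--     for ptype in priority_order:
--         if ptype in by_type: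
--             return by_type[ptype]
--     return fallback
-- ===== Notes on version B (the rewrite author's own statement) =====
-- stated objective: alternative
-- what changed: Replaces the priority-times-candidates nested scan (plus a separate fallback scan) by a single pass that builds a type->first-truthy-endpoint dict and the fallback, then one walk over the fixed priority list.
import Mathlib
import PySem

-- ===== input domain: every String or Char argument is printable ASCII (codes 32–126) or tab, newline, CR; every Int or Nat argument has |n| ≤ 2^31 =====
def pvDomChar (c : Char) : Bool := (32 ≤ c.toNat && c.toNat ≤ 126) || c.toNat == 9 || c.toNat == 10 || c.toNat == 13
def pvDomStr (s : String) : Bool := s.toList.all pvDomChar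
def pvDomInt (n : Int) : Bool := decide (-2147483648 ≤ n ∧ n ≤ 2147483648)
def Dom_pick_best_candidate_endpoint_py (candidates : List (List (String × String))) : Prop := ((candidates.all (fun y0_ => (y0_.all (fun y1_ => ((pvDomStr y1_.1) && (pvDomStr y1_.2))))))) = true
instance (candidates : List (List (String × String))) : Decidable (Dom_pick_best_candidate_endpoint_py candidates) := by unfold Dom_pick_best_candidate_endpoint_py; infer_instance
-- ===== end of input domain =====

-- B replaces A's priority×candidates nested scan by one pass building a type→first-truthy-endpoint
-- dict plus a fallback, then a single walk over the priority list (objective: alternative algorithm).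


-- ===== PORT A =====
-- truthiness of c.get("endpoint"): a present, non-empty string
def pvTruthy : Option String → Bool
  | some e => e ≠ ""
  | none => false

-- inner loop: 'for c in candidates: if c.get("type") == ptype and c.get("endpoint"): return c["endpoint"]'
-- (c["endpoint"] cannot raise here: the guard ensures the key is present, so it equals c.get("endpoint"))
def pvA_inner (candidates : List (List (String × String))) (pt : String) : Option String :=
  match candidates with
  | [] => none
  | c :: rest =>
    if ((PySem.Dict.mk c).get? "type" == some pt) && pvTruthy ((PySem.Dict.mk c).get? "endpoint")
    then (PySem.Dict.mk c).get? "endpoint"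
    else pvA_inner rest pt

-- outer loop over priority_order
def pvA_outer (prio : List String) (candidates : List (List (String × String))) : Option String :=
  match prio with
  | [] => none
  | p :: ps =>
    match pvA_inner candidates p with
    | some e => some e
    | none => pvA_outer ps candidates

-- fallback loop: first candidate with a truthy endpoint
def pvA_fallback (candidates : List (List (String × String))) : Option String :=
  match candidates with
  | [] => none
  | c :: rest =>
    if pvTruthy ((PySem.Dict.mk c).get? "endpoint")
    then (PySem.Dict.mk c).get? "endpoint"
    else pvA_fallback rest

def pick_best_candidate_endpoint_py (candidates : List (List (String × String))) : Option String :=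
  match pvA_outer ["ipv6", "upnp", "stun", "public", "lan", "vpn_routed"] candidates with
  | some e => some e
  | none => pvA_fallback candidates

-- ===== PORT B =====
-- single pass: build by_type (first truthy endpoint per type) and the fallback
def pvB_step (st : PySem.Dict String String × Option String) (c : List (String × String)) :
    PySem.Dict String String × Option String :=
  match (PySem.Dict.mk c).get? "endpoint" with
  | none => st
  | some e =>
    if e = "" then st
    else
      let fb := match st.2 with | none => some e | some f => some f
      let d := match (PySem.Dict.mk c).get? "type" with
               | none => st.1
               | some t => if st.1.contains t then st.1 else st.1.insert t e
      (d, fb)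

def pvB_scan (candidates : List (List (String × String))) :
    PySem.Dict String String × Option String :=
  candidates.foldl pvB_step (PySem.Dict.empty, none)

-- second loop: first priority type present in by_type, else the fallback
def pvB_prio (d : PySem.Dict String String) (fb : Option String) (prio : List String) : Option String :=
  match prio with
  | [] => fb
  | p :: ps =>
    match d.get? p with
    | some e => some e
    | none => pvB_prio d fb ps

def pick_best_candidate_endpoint_py_alt (candidates : List (List (String × String))) : Option String :=
  let st := pvB_scan candidates
  pvB_prio st.1 st.2 ["ipv6", "upnp", "stun", "public", "lan", "vpn_routed"]

-- ===== PRECONDITION & SPEC =====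
def Spec_pick_best_candidate_endpoint_py (candidates : List (List (String × String))) (out : Option String) : Prop := out = pick_best_candidate_endpoint_py_alt candidates
instance (candidates : List (List (String × String))) (out : Option String) : Decidable (Spec_pick_best_candidate_endpoint_py candidates out) := by unfold Spec_pick_best_candidate_endpoint_py; infer_instance

-- ===== CLAIM (what is proved, stated in full; the proofs are below) =====
def Claim_equal_pick_best_candidate_endpoint_py : Prop := ∀ (candidates : List (List (String × String))), Dom_pick_best_candidate_endpoint_py candidates → Spec_pick_best_candidate_endpoint_py candidates (pick_best_candidate_endpoint_py candidates)

-- ===== LEMMAS AND PROOFS =====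
-- the dict half of the scan computes, for every key p, exactly A's inner loop (seeded by the accumulator)
theorem pvB_scan_get? (cs : List (List (String × String)))
    (d : PySem.Dict String String) (fb : Option String) (p : String) :
    ((cs.foldl pvB_step (d, fb)).1).get? p = (d.get? p).or (pvA_inner cs p) := by
  induction cs generalizing d fb with
  | nil => simp [pvA_inner]
  | cons c rest ih =>
    simp only [List.foldl_cons]
    rcases hep : (PySem.Dict.mk c).get? "endpoint" with _ | e
    · simp [pvB_step, hep, ih, pvA_inner, pvTruthy]
    · by_cases he : e = ""
      · simp [pvB_step, hep, he, ih, pvA_inner, pvTruthy]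
      · rcases ht : (PySem.Dict.mk c).get? "type" with _ | t
        · simp [pvB_step, hep, he, ht, ih, pvA_inner, pvTruthy]
        · by_cases hc : d.contains t = true
          · rw [PySem.Dict.contains_eq_isSome_get?] at hc
            simp only [pvB_step, hep, he, ht, PySem.Dict.contains_eq_isSome_get?, hc, ih]
            by_cases hpt : t = p
            · subst hpt
              rcases hd : d.get? t with _ | v
              · rw [hd] at hc; simp at hc
              · simp [pvA_inner, hep, ht, hd, pvTruthy, he]
            · simp [pvA_inner, hep, ht, pvTruthy, he, hpt]
          · simp only [Bool.not_eq_true] at hc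
            simp only [pvB_step, hep, he, ht, hc, Bool.false_eq_true, if_neg, ih, not_false_eq_true]
            rw [PySem.Dict.get?_insert]
            by_cases hpt : p = t
            · subst hpt
              have hdn : d.get? p = none := by
                rw [PySem.Dict.contains_eq_isSome_get?] at hc
                cases h : d.get? p <;> simp [h] at hc ⊢
              simp [pvA_inner, hep, ht, pvTruthy, he, hdn]
            · simp [pvA_inner, hep, ht, pvTruthy, he, hpt, Ne.symm hpt]
  
-- the fallback half of the scan computes A's fallback loop (seeded by the accumulator)
theorem pvB_scan_fb (cs : List (List (String × String)))
    (d : PySem.Dict String String) (fb : Option String) :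
    (cs.foldl pvB_step (d, fb)).2 = fb.or (pvA_fallback cs) := by
  induction cs generalizing d fb with
  | nil => simp [pvA_fallback]
  | cons c rest ih =>
    simp only [List.foldl_cons]
    rcases hep : (PySem.Dict.mk c).get? "endpoint" with _ | e
    · simp [pvB_step, hep, ih, pvA_fallback, pvTruthy]
    · by_cases he : e = ""
      · simp [pvB_step, hep, he, ih, pvA_fallback, pvTruthy]
      · rcases hfb : fb with _ | f <;>
          simp [pvB_step, hep, he, ih, pvA_fallback, pvTruthy]

-- the priority walk over the dict equals A's outer loop, with fb where A falls through
theorem pvB_prio_eq (prio : List String) (cs : List (List (String × String))) (fb : Option String)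
    (d : PySem.Dict String String) (h : ∀ p, d.get? p = pvA_inner cs p) :
    pvB_prio d fb prio =
      (match pvA_outer prio cs with | some e => some e | none => fb) := by
  induction prio with
  | nil => simp [pvB_prio, pvA_outer]
  | cons p ps ih =>
    simp only [pvB_prio, pvA_outer, h p]
    rcases pvA_inner cs p with _ | e
    · simpa using ih
    · rfl

-- ===== VERDICT (by name: the statement is the Claim_ definition above) =====
theorem pick_best_candidate_endpoint_py_spec : Claim_equal_pick_best_candidate_endpoint_py := by
  intro candidates _
  unfold Spec_pick_best_candidate_endpoint_py
  unfold pick_best_candidate_endpoint_py pick_best_candidate_endpoint_py_alt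
  have hget : ∀ p, (pvB_scan candidates).1.get? p = pvA_inner candidates p := by
    intro p
    rw [pvB_scan, pvB_scan_get? candidates PySem.Dict.empty none p]
    simp [PySem.Dict.get?_empty]
  have hfb : (pvB_scan candidates).2 = pvA_fallback candidates := by
    rw [pvB_scan, pvB_scan_fb candidates PySem.Dict.empty none]
    simp
  rw [pvB_prio_eq _ candidates _ _ hget, hfb]
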